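-- pv_equiv track=rewrite | github.com/natahiko/Systemne | workType.py | check_gmail
-- ===== SOURCE A (Python) =====
-- def isLetter(char):
--     char = char.lower()
--     letters = ['s', 'h', 'k', 'a', 'r', 'o', 'v', 's']
--     for i in letters:
--         if char == i: return True
--     return False
--
-- def check_gmail(word, dog):
--     last = True
--     for i in word:
--         if (i == '@' or i == '.') and last:
--             return 0
--         elif i == '@' and not last:
--             if dog:
--                 return 0
--             else:
--                 dog = True
--                 last = True
--         elif i == '.' and not last:
--             last = True
--         elif isLetter(i):
--             last = False
--         else:
--             return 0
--     return 6
-- ===== SOURCE B (Python) =====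
-- def check_gmail(word, dog):
--     seps = {'@', '.'}
--     ok = (word.count('@') <= (0 if dog else 1)
--           and all(c.lower() in 'shkarov' or c in seps for c in word)
--           and all(not (a in seps and b in seps) for a, b in zip('.' + word, word)))
--     return 6 if ok else 0
-- ===== Notes on version B (the rewrite author's own statement) =====
-- stated objective: idiomatic
-- what changed: Replaces the early-return char-by-char state machine (with mutable dog/last flags) by a declarative conjunction of three global conditions: at most one '@' (none if dog), every character a permitted letter or separator, and no separator at the start or adjacent to another separator (checked by zipping the string with itself shifted).
import Mathlib
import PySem

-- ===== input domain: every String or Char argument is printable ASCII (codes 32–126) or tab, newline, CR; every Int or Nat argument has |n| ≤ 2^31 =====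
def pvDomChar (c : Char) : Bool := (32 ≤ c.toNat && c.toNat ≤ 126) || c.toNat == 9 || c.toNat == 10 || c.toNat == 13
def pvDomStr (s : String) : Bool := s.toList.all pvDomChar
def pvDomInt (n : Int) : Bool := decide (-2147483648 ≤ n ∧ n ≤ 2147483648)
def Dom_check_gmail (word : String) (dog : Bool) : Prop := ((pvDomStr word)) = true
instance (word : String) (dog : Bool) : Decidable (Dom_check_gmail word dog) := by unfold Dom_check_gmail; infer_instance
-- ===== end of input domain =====

-- B replaces A's early-return char-by-char state machine by a conjunction of three
-- global conditions on the string (idiomatic, same O(n) cost; return value only).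

-- ===== PORT A =====
-- 'for i in letters: if char == i: return True' as structural recursion on the list
def isLetterLoop : List Char → Char → Bool
  | [], _ => false
  | l :: ls, c => if c = l then true else isLetterLoop ls c

def isLetter (char : Char) : Bool :=
  let char := PySem.Chars.lowerChar char
  isLetterLoop ['s', 'h', 'k', 'a', 'r', 'o', 'v', 's'] char

-- A's 'for i in word' loop with its mutable state (dog, last); early returns become results
def checkLoop : List Char → Bool → Bool → Int
  | [], _, _ => 6
  | i :: rest, dog, last =>
    if (i = '@' ∨ i = '.') ∧ last then 0
    else if i = '@' ∧ ¬last then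
      (if dog then 0 else checkLoop rest true true)
    else if i = '.' ∧ ¬last then checkLoop rest dog true
    else if isLetter i then checkLoop rest dog false
    else 0

def check_gmail (word : String) (dog : Bool) : Int :=
  checkLoop word.toList dog true

-- ===== PORT B =====
def check_gmail_alt (word : String) (dog : Bool) : Int :=
  let seps : List Char := PySem.Set.ofList ['@', '.']
  let ok :=
    (PySem.Str.count word "@" ≤ (if dog then 0 else 1))
    && word.toList.all (fun c => "shkarov".toList.contains (PySem.Chars.lowerChar c) || seps.contains c)
    && ((('.' :: word.toList).zip word.toList).all (fun p => !(seps.contains p.1 && seps.contains p.2)))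
  if ok then 6 else 0

-- ===== PRECONDITION & SPEC =====
def Spec_check_gmail (word : String) (dog : Bool) (out : Int) : Prop := out = check_gmail_alt word dog
instance (word : String) (dog : Bool) (out : Int) : Decidable (Spec_check_gmail word dog out) := by unfold Spec_check_gmail; infer_instance

-- ===== CLAIM (what is proved, stated in full; the proofs are below) =====
def Claim_equal_check_gmail : Prop := ∀ (word : String) (dog : Bool), Dom_check_gmail word dog → Spec_check_gmail word dog (check_gmail word dog)

-- ===== LEMMAS AND PROOFS =====

-- PySem.Chars.count with a one-character needle is List.count
theorem go_singleton (c0 : Char) : ∀ (cs : List Char) (fuel acc : Nat), cs.length ≤ fuel →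
    PySem.Chars.count.go [c0] fuel cs acc = acc + cs.count c0 := by
  intro cs
  induction cs with
  | nil => intro fuel acc _; cases fuel <;> simp [PySem.Chars.count.go]
  | cons h t ih =>
    intro fuel acc hle
    cases fuel with
    | zero => simp at hle
    | succ f =>
      simp only [List.length_cons, Nat.succ_le_succ_iff] at hle
      by_cases hc : h = c0
      · subst hc
        simp only [PySem.Chars.count.go, List.isPrefixOf, beq_self_eq_true, Bool.true_and,
          if_true, List.length_cons, List.length_nil, List.drop_succ_cons, List.drop_zero]
        rw [ih f (acc + 1) hle, List.count_cons_self]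
        omega
      · have hpf : ([c0].isPrefixOf (h :: t)) = false := by
          simp [List.isPrefixOf]; exact fun hh => absurd hh.symm hc
        simp only [PySem.Chars.count.go, hpf]
        rw [ih f acc hle, List.count_cons_of_ne hc]
        simp

theorem count_singleton (cs : List Char) (c0 : Char) :
    PySem.Chars.count cs [c0] = cs.count c0 := by
  simp [PySem.Chars.count, go_singleton c0 cs cs.length 0 le_rfl]

def sepB (c : Char) : Bool := c = '@' ∨ c = '.'

-- the pairwise 'no separator after a separator' condition with prev-is-sep flag b
def pairOK : Bool → List Char → Bool
  | _, [] => true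
  | b, c :: rest => !(b && sepB c) && pairOK (sepB c) rest

theorem zip_all_eq_pairOK (p : Char) (cs : List Char) :
    ((p :: cs).zip cs).all (fun q => !(sepB q.1 && sepB q.2)) = pairOK (sepB p) cs := by
  induction cs generalizing p with
  | nil => simp [pairOK]
  | cons c rest ih => simp only [List.zip_cons_cons, List.all_cons, pairOK, ih c]

-- closed form of A's loop: count bound, allowed characters, pairwise separator condition
theorem checkLoop_eq (cs : List Char) : ∀ (dog last : Bool),
    checkLoop cs dog last =
      if (cs.count '@' ≤ (if dog then 0 else 1))
          && cs.all (fun c => isLetter c || sepB c)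
          && pairOK last cs then 6 else 0 := by
  induction cs with
  | nil => intro dog last; simp [checkLoop, pairOK]
  | cons i rest ih =>
    intro dog last
    by_cases hat : i = '@'
    · subst hat
      have hs : sepB '@' = true := by decide
      cases last with
      | true =>
        simp [checkLoop, pairOK, hs]
      | false =>
        cases dog with
        | true =>
          simp [checkLoop, List.count_cons_self]
        | false =>
          simp only [checkLoop]
          rw [ih true true]
          simp only [pairOK, hs, Bool.false_and, Bool.not_false, Bool.true_and,
            List.all_cons, List.count_cons_self]
          have : isLetter '@' = false := by decide
          simp only [this, Bool.false_or, Bool.true_and]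
          by_cases h1 : rest.count '@' = 0
          · simp [h1]
          · have h2 : ¬ (rest.count '@' ≤ 0) := by omega
            have h3 : ¬ (rest.count '@' + 1 ≤ 1) := by omega
            simp [h2, h3]
    · by_cases hdot : i = '.'
      · subst hdot
        have hs : sepB '.' = true := by decide
        cases last with
        | true => simp [checkLoop, pairOK, hs]
        | false =>
          simp only [checkLoop]
          rw [ih dog true]
          have hcnt : List.count '@' ('.' :: rest) = rest.count '@' := by
            exact List.count_cons_of_ne (by decide)
          simp only [pairOK, hs, Bool.false_and, Bool.not_false, Bool.true_and,
            List.all_cons, hcnt]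
          have : isLetter '.' = false := by decide
          simp [this]
      · have hs : sepB i = false := by simp [sepB, hat, hdot]
        have hcnt : List.count '@' (i :: rest) = rest.count '@' :=
          List.count_cons_of_ne hat
        by_cases hl : isLetter i = true
        · simp only [checkLoop, hat, hdot, false_and, if_false, hl, if_true]
          rw [ih dog false]
          simp [pairOK, hs, hcnt, hl]
        · simp only [checkLoop, hat, hdot, false_and, if_false,
            Bool.not_eq_true] at hl ⊢
          simp [hl, pairOK, hs, hcnt]

-- B's character test agrees with A's isLetter test, and set membership with sepB
theorem sepB_contains (c : Char) :
    (List.contains (PySem.Set.ofList ['@', '.']) c) = sepB c := by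
  have h : (PySem.Set.ofList ['@', '.'] : List Char) = ['@', '.'] := by decide
  rw [h]
  by_cases h1 : c = '@' <;> by_cases h2 : c = '.' <;> simp [sepB, h1, h2]

set_option maxRecDepth 4096 in
theorem letter_eq (c : Char) :
    ("shkarov".toList.contains (PySem.Chars.lowerChar c)) = isLetter c := by
  have h : "shkarov".toList = ['s', 'h', 'k', 'a', 'r', 'o', 'v'] := by decide
  rw [h]
  simp only [isLetter, isLetterLoop, List.contains_cons, List.contains_nil]
  generalize PySem.Chars.lowerChar c = l
  by_cases h1 : l = 's' <;> by_cases h2 : l = 'h' <;> by_cases h3 : l = 'k' <;>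
    by_cases h4 : l = 'a' <;> by_cases h5 : l = 'r' <;> by_cases h6 : l = 'o' <;>
    by_cases h7 : l = 'v' <;> simp [h1, h2, h3, h4, h5, h6, h7]

theorem sepB_dot : sepB '.' = true := by decide

-- ===== VERDICT (by name: the statement is the Claim_ definition above) =====
theorem check_gmail_spec : Claim_equal_check_gmail := by
  intro word dog _
  unfold Spec_check_gmail check_gmail check_gmail_alt
  rw [checkLoop_eq word.toList dog true, PySem.Str.count_eq]
  have hat : ("@" : String).toList = ['@'] := by decide
  rw [hat, count_singleton]
  simp only [letter_eq, sepB_contains, zip_all_eq_pairOK, sepB_dot]
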